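-- pv_equiv track=rewrite | github.com/PatoLocos/Erdos530 | experiments/verify_2to1_sweep.py | check_two_to_one_map
-- ===== SOURCE A (Python) =====
-- from collections import defaultdict
--
-- def check_two_to_one_map(blocked, capacity=2):
--     """
--     Check if there exists an assignment f: blocked_elements → pairs
--     where each blocked element maps to one of its witness pairs,
--     and each pair receives at most `capacity` elements.
--
--     Uses backtracking with constraint propagation.
--     Returns (True, assignment_dict) or (False, None).
--     """
--     if not blocked:
--         return True, {}
--
--     elements = sorted(blocked.keys())
--     pairs_usage = defaultdict(int)
--     assignment = {}
--
--     # Sort by number of choices (most constrained first = MRV heuristic)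
--     elements.sort(key=lambda x: len(blocked[x]))
--
--     def backtrack(idx):
--         if idx == len(elements):
--             return True
--
--         x = elements[idx]
--         for pair in sorted(blocked[x]):
--             if pairs_usage[pair] < capacity:
--                 pairs_usage[pair] += 1
--                 assignment[x] = pair
--                 if backtrack(idx + 1):
--                     return True
--                 pairs_usage[pair] -= 1
--                 del assignment[x]
--
--         return False
--
--     if backtrack(0):
--         return True, dict(assignment)
--     return False, None
-- ===== SOURCE B (Python) =====
-- def check_two_to_one_map(blocked, capacity=2):
--     """Iterative explicit-stack backtracking: same element order (sorted keys,
--     stable-sorted by number of witnesses) and same choice order (sorted pairs)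
--     as the recursive search, but frames on an explicit stack record the
--     not-yet-tried choices; popping restores the parent's capacity slot."""
--     if not blocked:
--         return True, {}
--
--     elements = sorted(blocked.keys())
--     elements.sort(key=lambda x: len(blocked[x]))
--     choices = {x: sorted(blocked[x]) for x in elements}
--     n = len(elements)
--
--     usage = {}
--     assignment = {}
--     # frame: [element, choices not yet tried by this frame]
--     stack = [[elements[0], choices[elements[0]]]]
--     while stack:
--         x, cands = stack[-1]
--         # take the first untried choice with spare capacity, discarding the rest of the prefix
--         p = None
--         while cands:
--             q, cands = cands[0], cands[1:]
--             if usage.get(q, 0) < capacity: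
--                 p = q
--                 break
--         stack[-1][1] = cands
--         if p is not None:
--             usage[p] = usage.get(p, 0) + 1
--             assignment[x] = p
--             if len(stack) == n:
--                 return True, dict(assignment)
--             nxt = elements[len(stack)]
--             stack.append([nxt, choices[nxt]])
--         else:
--             stack.pop()
--             if stack:
--                 y = stack[-1][0]
--                 r = assignment.pop(y)
--                 usage[r] -= 1
--     return False, None
-- ===== Notes on version B (the rewrite author's own statement) =====
-- stated objective: alternative
-- what changed: The recursive backtrack with shared mutable state is replaced by an iterative depth-first search over an explicit stack of frames (element, untried choices); popping a frame undoes the parent's assignment and capacity slot, reproducing the identical search order and first-found assignment.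
import Mathlib
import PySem

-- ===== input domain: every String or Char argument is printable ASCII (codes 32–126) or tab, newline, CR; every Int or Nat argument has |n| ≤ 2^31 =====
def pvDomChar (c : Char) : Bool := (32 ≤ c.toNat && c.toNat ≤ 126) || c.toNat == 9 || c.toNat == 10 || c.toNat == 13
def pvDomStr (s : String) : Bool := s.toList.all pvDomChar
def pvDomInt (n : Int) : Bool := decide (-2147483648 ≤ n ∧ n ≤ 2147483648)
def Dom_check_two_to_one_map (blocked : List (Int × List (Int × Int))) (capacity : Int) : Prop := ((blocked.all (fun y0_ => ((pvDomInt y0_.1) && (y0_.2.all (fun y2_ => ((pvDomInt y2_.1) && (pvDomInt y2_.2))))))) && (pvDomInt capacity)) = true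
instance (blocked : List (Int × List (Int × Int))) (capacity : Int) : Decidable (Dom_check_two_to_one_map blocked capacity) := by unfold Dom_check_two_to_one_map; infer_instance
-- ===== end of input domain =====

-- B replaces A's recursive backtracking with an explicit-stack iterative search
-- over the same element/choice order (objective: alternative decomposition, same
-- first-found assignment).

-- ===== PORT A =====
-- Recursive backtracking, step for step.  The defaultdict(int) `pairs_usage` is
-- ported as its lookup function (pair ↦ count): the Python only ever reads
-- `pairs_usage[pair]` and writes `± 1`, which this represents exactly.
-- `backtrack(idx)` walks `elements[idx:]`, so it is ported as structural
-- recursion on the remaining suffix of `elements`; the in-place assign/undo pair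
-- (`assignment[x] = pair` … `del assignment[x]`, `+= 1` … `-= 1`) is ported by
-- passing the updated state down and retrying with the untouched state, which is
-- the state Python has restored at that point.
mutual
def pvA_bt (cap : Int) (d : PySem.Dict Int (List (Int × Int))) (l : List Int)
    (usage : (Int × Int) → Int) (asg : PySem.Dict Int (Int × Int)) :
    Option (PySem.Dict Int (Int × Int)) :=
  match l with
  | [] => some asg                      -- idx == len(elements): success
  | x :: rest =>
      -- for pair in sorted(blocked[x]): …
      pvA_try cap d x (PySem.List.sorted2 (d.getD x []) (fun t => t.1) (fun t => t.2)) rest usage asg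
termination_by (l.length, 0)

def pvA_try (cap : Int) (d : PySem.Dict Int (List (Int × Int))) (x : Int)
    (cs : List (Int × Int)) (rest : List Int)
    (usage : (Int × Int) → Int) (asg : PySem.Dict Int (Int × Int)) :
    Option (PySem.Dict Int (Int × Int)) :=
  match cs with
  | [] => none                          -- loop exhausted: return False
  | p :: ps =>
      if usage p < cap then
        match pvA_bt cap d rest (fun q => if q = p then usage q + 1 else usage q) (asg.insert x p) with
        | some res => some res
        | none => pvA_try cap d x ps rest usage asg
      else pvA_try cap d x ps rest usage asg
termination_by (rest.length, cs.length)
end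

def check_two_to_one_map (blocked : List (Int × List (Int × Int))) (capacity : Int) : Bool × (Option (List (Int × Int × Int))) :=
  if blocked = [] then (true, some [])
  else
    let d := PySem.Dict.ofList blocked
    -- elements = sorted(blocked.keys()); elements.sort(key=lambda x: len(blocked[x]))
    let elements := PySem.List.sorted (PySem.List.sorted d.keys (fun x => x)) (fun x => (d.getD x []).length)
    match pvA_bt capacity d elements (fun _ => 0) PySem.Dict.empty with
    | some asg => (true, some asg.items)
    | none => (false, none)

-- ===== PORT B =====
-- Iterative explicit-stack search (Source B).  A frame holds the element, its
-- not-yet-tried choices, and the elements still to be placed after it (Source B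
-- reads the latter off `elements[len(stack):]`; the port carries that suffix in
-- the frame).  `usage` is the lookup function of the dict `usage` (only read
-- via .get(p, 0)).  The inner `while cands:` scan is pvB_scan.
def pvB_scan (cap : Int) (usage : (Int × Int) → Int) :
    List (Int × Int) → Option ((Int × Int) × List (Int × Int))
  | [] => none
  | q :: cands => if usage q < cap then some (q, cands) else pvB_scan cap usage cands

-- termination helpers for pvB_loop (cited by its decreasing_by only)
def pvW (d : PySem.Dict Int (List (Int × Int))) : Nat :=
  1 + (d.values.map List.length).foldr max 0

theorem pvLe_foldr_max (a : Nat) : ∀ l : List Nat, a ∈ l → a ≤ l.foldr max 0 := by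
  intro l
  induction l with
  | nil => intro h; cases h
  | cons b t ih =>
      intro h
      rcases List.mem_cons.mp h with rfl | h
      · exact le_max_left _ _
      · exact le_trans (ih h) (le_max_right _ _)

theorem pvChoiceLen_lt (d : PySem.Dict Int (List (Int × Int))) (y : Int) :
    (PySem.List.sorted2 (d.getD y []) (fun t => t.1) (fun t => t.2)).length < pvW d := by
  have hlen : (PySem.List.sorted2 (d.getD y []) (fun t => t.1) (fun t => t.2)).length
      = (d.getD y []).length :=
    (PySem.List.sorted2_perm (d.getD y []) (fun t => t.1) (fun t => t.2) false).length_eq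
  rw [hlen, pvW]
  rcases hg : d.get? y with _ | v
  · simp [PySem.Dict.getD, hg]
  · have hv : v ∈ d.values := by
      have := PySem.Dict.mem_items_of_get?_eq_some (d := d) hg
      simp only [PySem.Dict.values]
      exact List.mem_map.mpr ⟨(y, v), this, rfl⟩
    have : v.length ∈ (d.values.map List.length) := List.mem_map.mpr ⟨v, hv, rfl⟩
    have := pvLe_foldr_max _ _ this
    simp [PySem.Dict.getD, hg]
    omega

theorem pvB_scan_length (cap : Int) (u : (Int × Int) → Int) :
    ∀ cs p rest, pvB_scan cap u cs = some (p, rest) → rest.length < cs.length := by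
  intro cs
  induction cs with
  | nil => intro p rest h; simp [pvB_scan] at h
  | cons q t ih =>
      intro p rest h
      simp only [pvB_scan] at h
      split at h
      · cases h; simp
      · exact Nat.lt_trans (ih _ _ h) (by simp)

def pvB_loop (cap : Int) (d : PySem.Dict Int (List (Int × Int)))
    (S : List (Int × List (Int × Int) × List Int))
    (usage : (Int × Int) → Int) (asg : PySem.Dict Int (Int × Int)) :
    Bool × (Option (List (Int × Int × Int))) :=
  match S with
  | [] => (false, none)                                   -- while stack: exhausted
  | (x, cands, r) :: S' =>
    match hscan : pvB_scan cap usage cands with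
    | some (p, rest) =>                                   -- first usable choice found
      let usage' := fun q => if q = p then usage q + 1 else usage q
      let asg' := asg.insert x p
      match r with
      | [] => (true, some asg'.items)                     -- len(stack) == n
      | y :: r' =>                                        -- push next element's frame
          pvB_loop cap d ((y, PySem.List.sorted2 (d.getD y []) (fun t => t.1) (fun t => t.2), r') :: (x, rest, y :: r') :: S') usage' asg'
    | none =>                                             -- frame exhausted: pop
      match S' with
      | [] => (false, none)                               -- stack empty after pop
      | (y, ds, ry) :: S'' =>                             -- undo parent's assignment
          pvB_loop cap d ((y, ds, ry) :: S'')
            (fun q => if q = (asg.get? y).getD (0, 0) then usage q - 1 else usage q)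
            (asg.erase y)
termination_by 2 * (S.map (fun f => f.2.1.length * (pvW d) ^ (1 + f.2.2.length))).sum + S.length
decreasing_by
  · -- push: the parent frame's candidate list shrank, the child's term is dominated
    have hrest : rest.length + 1 ≤ cands.length :=
      pvB_scan_length cap usage cands p rest hscan
    have hcy := pvChoiceLen_lt d y
    have hw : 0 < pvW d := by simp [pvW]
    have hpow : 0 < pvW d ^ (1 + r'.length) := Nat.pow_pos hw
    simp only [List.map_cons, List.sum_cons, List.length_cons]
    have hQ : pvW d ^ (1 + (r'.length + 1)) = pvW d * pvW d ^ (1 + r'.length) := by ring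
    have h1 : (PySem.List.sorted2 (d.getD y []) (fun t => t.1) (fun t => t.2)).length * pvW d ^ (1 + r'.length)
        + pvW d ^ (1 + r'.length) ≤ pvW d ^ (1 + (r'.length + 1)) := by
      have : ((PySem.List.sorted2 (d.getD y []) (fun t => t.1) (fun t => t.2)).length + 1) * pvW d ^ (1 + r'.length)
          ≤ pvW d * pvW d ^ (1 + r'.length) := Nat.mul_le_mul_right _ hcy
      calc (PySem.List.sorted2 (d.getD y []) (fun t => t.1) (fun t => t.2)).length * pvW d ^ (1 + r'.length)
            + pvW d ^ (1 + r'.length)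
          = ((PySem.List.sorted2 (d.getD y []) (fun t => t.1) (fun t => t.2)).length + 1) * pvW d ^ (1 + r'.length) := by ring
        _ ≤ pvW d * pvW d ^ (1 + r'.length) := this
        _ = pvW d ^ (1 + (r'.length + 1)) := hQ.symm
    have h2 : rest.length * pvW d ^ (1 + (r'.length + 1)) + pvW d ^ (1 + (r'.length + 1))
        ≤ cands.length * pvW d ^ (1 + (r'.length + 1)) := by
      calc rest.length * pvW d ^ (1 + (r'.length + 1)) + pvW d ^ (1 + (r'.length + 1))
          = (rest.length + 1) * pvW d ^ (1 + (r'.length + 1)) := by ring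
        _ ≤ cands.length * pvW d ^ (1 + (r'.length + 1)) := Nat.mul_le_mul_right _ hrest
    omega
  · -- pop: one frame removed, its (nonnegative) term leaves the sum
    simp only [List.map_cons, List.sum_cons, List.length_cons]
    omega

def check_two_to_one_map_alt (blocked : List (Int × List (Int × Int))) (capacity : Int) : Bool × (Option (List (Int × Int × Int))) :=
  if blocked = [] then (true, some [])
  else
    let d := PySem.Dict.ofList blocked
    -- elements = sorted(blocked.keys()); elements.sort(key=lambda x: len(blocked[x]))
    let elements := PySem.List.sorted (PySem.List.sorted d.keys (fun x => x)) (fun x => (d.getD x []).length)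
    match elements with
    | [] => (false, none)   -- unreachable: blocked ≠ [] gives a first element
    | e0 :: restE =>
        pvB_loop capacity d [(e0, PySem.List.sorted2 (d.getD e0 []) (fun t => t.1) (fun t => t.2), restE)]
          (fun _ => 0) PySem.Dict.empty

-- ===== PRECONDITION & SPEC =====
def Spec_check_two_to_one_map (blocked : List (Int × List (Int × Int))) (capacity : Int) (out : Bool × (Option (List (Int × Int × Int)))) : Prop := out = check_two_to_one_map_alt blocked capacity
instance (blocked : List (Int × List (Int × Int))) (capacity : Int) (out : Bool × (Option (List (Int × Int × Int)))) : Decidable (Spec_check_two_to_one_map blocked capacity out) := by unfold Spec_check_two_to_one_map; infer_instance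

-- ===== CLAIM (what is proved, stated in full; the proofs are below) =====
def Claim_equal_check_two_to_one_map : Prop := ∀ (blocked : List (Int × List (Int × Int))) (capacity : Int), Dom_check_two_to_one_map blocked capacity → Spec_check_two_to_one_map blocked capacity (check_two_to_one_map blocked capacity)

-- ===== LEMMAS AND PROOFS =====

-- the pop branch of pvB_loop, as a function of the remaining stack and the state
def pvPopK (cap : Int) (d : PySem.Dict Int (List (Int × Int)))
    (S : List (Int × List (Int × Int) × List Int))
    (usage : (Int × Int) → Int) (asg : PySem.Dict Int (Int × Int)) :
    Bool × (Option (List (Int × Int × Int))) :=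
  match S with
  | [] => (false, none)
  | (y, ds, ry) :: S'' =>
      pvB_loop cap d ((y, ds, ry) :: S'')
        (fun q => if q = (asg.get? y).getD (0, 0) then usage q - 1 else usage q)
        (asg.erase y)

-- inserting a fresh key and erasing it again is the identity
theorem pv_erase_insert_fresh (a : PySem.Dict Int (Int × Int)) (x : Int) (p : Int × Int)
    (h : a.get? x = none) : (a.insert x p).erase x = a := by
  have hc : a.contains x = false := by
    rw [PySem.Dict.contains_eq_isSome_get?, h]; rfl
  have hk : x ∉ a.keys := (PySem.Dict.get?_eq_none_iff_not_mem_keys (d := a) (k := x)).mp h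
  apply PySem.Dict.ext
  rw [PySem.Dict.erase, PySem.Dict.items_insert_of_not_contains _ _ hc]
  rw [List.filter_append]
  simp only [List.filter_cons, List.filter_nil]
  rw [if_neg (by simp), List.append_nil]
  apply List.filter_eq_self.mpr
  intro q hq
  have hmem : q.1 ∈ a.keys := by
    simp only [PySem.Dict.keys]; exact List.mem_map.mpr ⟨q, hq, rfl⟩
  have hne : q.1 ≠ x := fun hqx => hk (hqx ▸ hmem)
  simp [hne]

-- popping a frame decrements the slot its parent bumped: usage is restored
theorem pv_undo_usage (a : PySem.Dict Int (Int × Int)) (x : Int) (p : Int × Int)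
    (u : (Int × Int) → Int) :
    (fun q => if q = (((a.insert x p).get? x).getD (0, 0))
              then (if q = p then u q + 1 else u q) - 1
              else if q = p then u q + 1 else u q) = u := by
  funext q
  rw [PySem.Dict.get?_insert_self]
  by_cases hq : q = p <;> simp [hq]

-- the three one-step unfoldings of pvB_loop on a nonempty stack
theorem pv_loop_pop (cap : Int) (d : PySem.Dict Int (List (Int × Int)))
    (x : Int) (cands : List (Int × Int)) (r : List Int)
    (S : List (Int × List (Int × Int) × List Int))
    (u : (Int × Int) → Int) (a : PySem.Dict Int (Int × Int))
    (h : pvB_scan cap u cands = none) :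
    pvB_loop cap d ((x, cands, r) :: S) u a = pvPopK cap d S u a := by
  rw [pvB_loop.eq_def]
  simp only []
  split
  · rename_i p' rest' hscan
    rw [h] at hscan; cases hscan
  · cases S with
    | nil => rfl
    | cons f S2 => rcases f with ⟨y, ds, ry⟩; rfl

theorem pv_loop_succ (cap : Int) (d : PySem.Dict Int (List (Int × Int)))
    (x : Int) (cands : List (Int × Int)) (p : Int × Int) (rest : List (Int × Int))
    (S : List (Int × List (Int × Int) × List Int))
    (u : (Int × Int) → Int) (a : PySem.Dict Int (Int × Int))
    (h : pvB_scan cap u cands = some (p, rest)) :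
    pvB_loop cap d ((x, cands, []) :: S) u a = (true, some ((a.insert x p).items)) := by
  rw [pvB_loop.eq_def]
  simp only []
  split
  · rename_i p' rest' hscan
    rw [h] at hscan; cases hscan; rfl
  · rename_i hscan
    rw [h] at hscan; cases hscan

theorem pv_loop_push (cap : Int) (d : PySem.Dict Int (List (Int × Int)))
    (x y : Int) (cands : List (Int × Int)) (p : Int × Int) (rest : List (Int × Int)) (r' : List Int)
    (S : List (Int × List (Int × Int) × List Int))
    (u : (Int × Int) → Int) (a : PySem.Dict Int (Int × Int))
    (h : pvB_scan cap u cands = some (p, rest)) :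
    pvB_loop cap d ((x, cands, y :: r') :: S) u a
      = pvB_loop cap d ((y, PySem.List.sorted2 (d.getD y []) (fun t => t.1) (fun t => t.2), r') :: (x, rest, y :: r') :: S)
          (fun q => if q = p then u q + 1 else u q) (a.insert x p) := by
  rw [pvB_loop.eq_def]
  simp only []
  split
  · rename_i p' rest' hscan
    rw [h] at hscan; cases hscan; rfl
  · rename_i hscan
    rw [h] at hscan; cases hscan

-- a choice over capacity is skipped for good, on both sides
theorem pv_loop_skip (cap : Int) (d : PySem.Dict Int (List (Int × Int)))
    (x : Int) (p : Int × Int) (ps : List (Int × Int)) (r : List Int)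
    (S : List (Int × List (Int × Int) × List Int))
    (u : (Int × Int) → Int) (a : PySem.Dict Int (Int × Int))
    (hp : ¬ u p < cap) :
    pvB_loop cap d ((x, p :: ps, r) :: S) u a = pvB_loop cap d ((x, ps, r) :: S) u a := by
  have hs : pvB_scan cap u (p :: ps) = pvB_scan cap u ps := by
    simp [pvB_scan, if_neg hp]
  cases hsc : pvB_scan cap u ps with
  | none => rw [pv_loop_pop _ _ _ _ _ _ _ _ (hs.trans hsc), pv_loop_pop _ _ _ _ _ _ _ _ hsc]
  | some pr =>
      rcases pr with ⟨p', rest'⟩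
      cases r with
      | nil => rw [pv_loop_succ _ _ _ _ _ _ _ _ _ (hs.trans hsc), pv_loop_succ _ _ _ _ _ _ _ _ _ hsc]
      | cons y r' => rw [pv_loop_push _ _ _ _ _ _ _ _ _ _ _ (hs.trans hsc), pv_loop_push _ _ _ _ _ _ _ _ _ _ _ hsc]

theorem pvA_try_skip (cap : Int) (d : PySem.Dict Int (List (Int × Int)))
    (x : Int) (p : Int × Int) (ps : List (Int × Int)) (rest : List Int)
    (u : (Int × Int) → Int) (a : PySem.Dict Int (Int × Int))
    (hp : ¬ u p < cap) :
    pvA_try cap d x (p :: ps) rest u a = pvA_try cap d x ps rest u a := by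
  rw [pvA_try.eq_def]
  simp only [if_neg hp]

-- the heart of the equivalence: running the explicit-stack machine on a frame
-- computes exactly what the recursive search computes on that frame, and on
-- failure resumes the parent frames unchanged
theorem pvL1 (cap : Int) (d : PySem.Dict Int (List (Int × Int))) :
    ∀ (r : List Int), ∀ (cs : List (Int × Int)) (x : Int)
      (S : List (Int × List (Int × Int) × List Int))
      (u : (Int × Int) → Int) (a : PySem.Dict Int (Int × Int)),
    (x :: r).Nodup → (∀ z ∈ x :: r, a.get? z = none) →
    pvB_loop cap d ((x, cs, r) :: S) u a =
      match pvA_try cap d x cs r u a with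
      | some res => (true, some res.items)
      | none => pvPopK cap d S u a := by
  intro r
  induction r with
  | nil =>
      intro cs
      induction cs with
      | nil =>
          intro x S u a h1 h2
          rw [pv_loop_pop _ _ _ _ _ _ _ _ rfl]
          rw [pvA_try.eq_def]
      | cons p ps ihcs =>
          intro x S u a h1 h2
          by_cases hp : u p < cap
          · have hs : pvB_scan cap u (p :: ps) = some (p, ps) := by
              simp [pvB_scan, if_pos hp]
            rw [pv_loop_succ _ _ _ _ _ _ _ _ _ hs]
            rw [pvA_try.eq_def]
            simp only [if_pos hp, pvA_bt]
          · rw [pv_loop_skip _ _ _ _ _ _ _ _ _ hp, ihcs x S u a h1 h2,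
                pvA_try_skip _ _ _ _ _ _ _ _ hp]
  | cons y r' ihr =>
      intro cs
      induction cs with
      | nil =>
          intro x S u a h1 h2
          rw [pv_loop_pop _ _ _ _ _ _ _ _ rfl]
          rw [pvA_try.eq_def]
      | cons p ps ihcs =>
          intro x S u a h1 h2
          by_cases hp : u p < cap
          · have hs : pvB_scan cap u (p :: ps) = some (p, ps) := by
              simp [pvB_scan, if_pos hp]
            rw [pv_loop_push _ _ _ _ _ _ _ _ _ _ _ hs]
            have hxa : a.get? x = none := h2 x List.mem_cons_self
            have hnd : (y :: r').Nodup := h1.of_cons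
            have hxnotin : x ∉ y :: r' := by
              have := List.nodup_cons.mp h1
              exact this.1
            have ha' : ∀ z ∈ y :: r', (a.insert x p).get? z = none := by
              intro z hz
              have hzx : z ≠ x := fun hzx => hxnotin (hzx ▸ hz)
              rw [PySem.Dict.get?_insert_of_ne _ _ hzx]
              exact h2 z (List.mem_cons_of_mem _ hz)
            rw [ihr (PySem.List.sorted2 (d.getD y []) (fun t => t.1) (fun t => t.2)) y
                  ((x, ps, y :: r') :: S) (fun q => if q = p then u q + 1 else u q)
                  (a.insert x p) hnd ha']
            have hbt : pvA_bt cap d (y :: r') (fun q => if q = p then u q + 1 else u q) (a.insert x p)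
                = pvA_try cap d y (PySem.List.sorted2 (d.getD y []) (fun t => t.1) (fun t => t.2)) r'
                    (fun q => if q = p then u q + 1 else u q) (a.insert x p) := by
              rw [pvA_bt.eq_def]
            rw [pvA_try.eq_def (cs := p :: ps)]
            simp only [if_pos hp, hbt]
            cases hres : pvA_try cap d y (PySem.List.sorted2 (d.getD y []) (fun t => t.1) (fun t => t.2)) r'
                (fun q => if q = p then u q + 1 else u q) (a.insert x p) with
            | some res => rfl
            | none =>
                simp only [pvPopK]
                rw [pv_undo_usage a x p u, pv_erase_insert_fresh a x p hxa]
                exact ihcs x S u a h1 h2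
          · rw [pv_loop_skip _ _ _ _ _ _ _ _ _ hp, ihcs x S u a h1 h2,
                pvA_try_skip _ _ _ _ _ _ _ _ hp]

-- the keys of the dict built from the association list
theorem pv_keys_ofList (blocked : List (Int × List (Int × Int))) :
    (PySem.Dict.ofList blocked).keys = PySem.Set.ofList (blocked.map Prod.fst) := by
  rw [PySem.Dict.ofList, PySem.Dict.update]
  rw [PySem.Dict.keys_foldl_insert_key blocked Prod.fst (fun _ p => p.2) PySem.Dict.empty]
  rfl

-- ===== VERDICT (by name: the statement is the Claim_ definition above) =====
theorem check_two_to_one_map_spec : Claim_equal_check_two_to_one_map := by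
  intro blocked capacity hdom
  unfold Spec_check_two_to_one_map
  by_cases hb : blocked = []
  · simp [check_two_to_one_map, check_two_to_one_map_alt, hb]
  · rw [check_two_to_one_map, check_two_to_one_map_alt]
    simp only [if_neg hb]
    have hkeys := pv_keys_ofList blocked
    have hkne : (PySem.Dict.ofList blocked).keys ≠ [] := by
      rw [hkeys]
      cases blocked with
      | nil => exact absurd rfl hb
      | cons b tl => rw [List.map_cons, PySem.Set.ofList_cons]; simp
    have hknd : (PySem.Dict.ofList blocked).keys.Nodup := by
      rw [hkeys]; exact PySem.Set.nodup_ofList _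
    have hend : (PySem.List.sorted (PySem.List.sorted (PySem.Dict.ofList blocked).keys (fun x => x))
        (fun x => ((PySem.Dict.ofList blocked).getD x []).length)).Nodup := by
      exact (((PySem.List.sorted_perm _ _ _).trans (PySem.List.sorted_perm _ _ _)).symm).nodup hknd
    have hene : (PySem.List.sorted (PySem.List.sorted (PySem.Dict.ofList blocked).keys (fun x => x))
        (fun x => ((PySem.Dict.ofList blocked).getD x []).length)) ≠ [] := by
      intro hnil
      rw [PySem.List.sorted_eq_nil_iff, PySem.List.sorted_eq_nil_iff] at hnil
      exact hkne hnil
    cases helems : (PySem.List.sorted (PySem.List.sorted (PySem.Dict.ofList blocked).keys (fun x => x))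
        (fun x => ((PySem.Dict.ofList blocked).getD x []).length)) with
    | nil => exact absurd helems hene
    | cons e0 restE =>
        rw [helems] at hend
        have hempty : ∀ z ∈ e0 :: restE, (PySem.Dict.empty (κ := Int) (ν := Int × Int)).get? z = none := by
          intro z _; exact PySem.Dict.get?_empty z
        simp only []
        rw [pvL1 capacity (PySem.Dict.ofList blocked) restE
              (PySem.List.sorted2 ((PySem.Dict.ofList blocked).getD e0 []) (fun t => t.1) (fun t => t.2)) e0
              [] (fun _ => 0) PySem.Dict.empty hend hempty]
        rw [pvA_bt.eq_def]
        simp only []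
        cases pvA_try capacity (PySem.Dict.ofList blocked) e0
            (PySem.List.sorted2 ((PySem.Dict.ofList blocked).getD e0 []) (fun t => t.1) (fun t => t.2)) restE
            (fun _ => 0) PySem.Dict.empty with
        | some res => rfl
        | none => rfl
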